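-- pv_equiv track=rewrite | github.com/pc5401/my_BOJ | 백준/Bronze/15475. 双六 （Sugoroku）/双六 （Sugoroku）.py | can_clear
-- ===== SOURCE A (Python) =====
-- from collections import deque
--
-- def can_clear(N, A, j):
--     visited = [0] * (N+3)
--     visited[1] = 1
--     queue = deque([1])
--
--     while queue:
--         pos = queue.popleft()
--         if pos >= N+2:
--             return 1
--         for dice_num in range(1, j+1):
--             nxt = pos + dice_num
--             if nxt >= N+2:
--                 return 1
--             if A[nxt - 2] == 1:
--                 continue
--             if not visited[nxt]:
--                 visited[nxt] = 1
--                 queue.append(nxt)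
--     return 0
-- ===== SOURCE B (Python) =====
-- def can_clear(N, A, j):
--     # Greedy one-pass: a cell is reachable iff it is open and lies within j of
--     # the farthest reachable cell before it, so tracking only that farthest
--     # cell suffices (positions: 1 = start, 2..N+1 = board cells, >= N+2 = goal).
--     last = 1  # farthest reachable position so far
--     for pos in range(2, N + 2):
--         if pos - last <= j and A[pos - 2] != 1:
--             last = pos
--     return 1 if last + j >= N + 2 else 0
-- ===== Notes on version B (the rewrite author's own statement) =====
-- stated objective: simpler
-- what changed: Replaces the BFS (deque, visited array, per-cell scan over all j dice values) by a greedy one-pass that tracks only the farthest reachable position; Pre_ excludes N <= -2 and (for j >= 1) boards with fewer than N cells, where A raises IndexError, and the degenerate N = -1 with j < 0, where A's returned 1 is an accident of its BFS start check.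
-- outside the precondition, e.g. on can_clear(-1, [], -1): A returns 1, B returns 0; on can_clear(5, [1], 1): A returns 0, B returns 0
import Mathlib
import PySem

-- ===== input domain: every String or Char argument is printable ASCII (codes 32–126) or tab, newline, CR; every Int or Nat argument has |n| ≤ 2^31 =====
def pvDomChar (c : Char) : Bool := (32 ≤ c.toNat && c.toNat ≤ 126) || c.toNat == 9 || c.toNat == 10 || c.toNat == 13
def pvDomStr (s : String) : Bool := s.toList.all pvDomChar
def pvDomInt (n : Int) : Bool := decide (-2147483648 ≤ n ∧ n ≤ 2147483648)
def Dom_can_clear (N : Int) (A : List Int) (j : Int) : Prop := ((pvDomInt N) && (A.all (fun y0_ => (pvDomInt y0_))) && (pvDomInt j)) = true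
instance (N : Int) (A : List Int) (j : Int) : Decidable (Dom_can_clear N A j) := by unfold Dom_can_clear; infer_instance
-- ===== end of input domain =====

-- B replaces A's BFS (deque + scan over all j dice values per popped cell) by a greedy one-pass
-- that only tracks the farthest reachable position; equivalence is about the return value.

-- ===== PORT A =====
-- inner `for dice_num in range(1, j+1)` loop of A; `none` = the Python `return 1`
def bfsDice (N : Int) (A : List Int) (pos : Int) : List Int → List Int × List Int → Option (List Int × List Int)
  | [], st => some st
  | d :: ds, (visited, queue) =>
      if N + 2 ≤ pos + d then none
      else if PySem.List.pyGetD A (pos + d - 2) 0 = 1 then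
        bfsDice N A pos ds (visited, queue)
      else if PySem.List.pyGetD visited (pos + d) 0 ≠ 0 then
        bfsDice N A pos ds (visited, queue)
      else
        bfsDice N A pos ds (PySem.List.pySetD visited (pos + d) 1, queue ++ [pos + d])

-- `while queue:` loop of A; the fuel argument only makes the recursion structural (the proof
-- shows it never runs out on admitted inputs)
def bfsLoop (N j : Int) (A : List Int) : Nat → List Int → List Int → Int
  | 0, _, _ => 0
  | fuel + 1, visited, queue =>
      match queue with
      | [] => 0
      | pos :: rest =>
          if N + 2 ≤ pos then 1
          else
            match bfsDice N A pos (PySem.List.pyRange 1 (j + 1) 1) (visited, rest) with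
            | none => 1
            | some st => bfsLoop N j A fuel st.1 st.2

def can_clear (N : Int) (A : List Int) (j : Int) : Int :=
  bfsLoop N j A (2 * (N + 3).toNat + 1)
    (PySem.List.pySetD (List.replicate (N + 3).toNat 0) 1 1) [1]

-- ===== PORT B =====
-- body of B's `for pos in range(2, N+2)` loop, folded over `last`
def greedyStep (A : List Int) (j : Int) (last : Int) (pos : Int) : Int :=
  if pos - last ≤ j ∧ PySem.List.pyGetD A (pos - 2) 0 ≠ 1 then pos else last

def can_clear_alt (N : Int) (A : List Int) (j : Int) : Int :=
  let last := (PySem.List.pyRange 2 (N + 2) 1).foldl (greedyStep A j) 1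
  if N + 2 ≤ last + j then 1 else 0

-- ===== PRECONDITION & SPEC =====
-- Pre_ excludes: N ≤ -2, where A raises IndexError on `visited[1] = 1`; boards with fewer than
-- N cells when j ≥ 1, where A raises IndexError as soon as its BFS reads a missing cell (which
-- cells are read depends on the run, so the whole short-board region is excluded); and the
-- degenerate N = -1 with j < 0, where A's returned 1 (the start already counts as past the goal
-- of a board of -1 cells) is an accident of its BFS.
def Pre_can_clear (N : Int) (A : List Int) (j : Int) : Prop :=
  -1 ≤ N ∧ (0 ≤ N ∨ 0 ≤ j) ∧ (N ≤ (A.length : Int) ∨ j ≤ 0)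
instance (N : Int) (A : List Int) (j : Int) : Decidable (Pre_can_clear N A j) := by
  unfold Pre_can_clear; infer_instance

def pvWitness_can_clear : Int × List Int × Int := (3, ([0, 1, 0], 2))

def Spec_can_clear (N : Int) (A : List Int) (j : Int) (out : Int) : Prop := out = can_clear_alt N A j
instance (N : Int) (A : List Int) (j : Int) (out : Int) : Decidable (Spec_can_clear N A j out) := by
  unfold Spec_can_clear; infer_instance

-- ===== CLAIM (what is proved, stated in full; the proofs are below) =====
def Claim_equal_can_clear : Prop := ∀ (N : Int) (A : List Int) (j : Int),
  Dom_can_clear N A j → Pre_can_clear N A j → Spec_can_clear N A j (can_clear N A j)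

-- ===== LEMMAS AND PROOFS =====

-- reachability of a position by forward dice moves, the common semantics of both ports
inductive pvReach (N j : Int) (A : List Int) : Int → Prop
  | one : pvReach N j A 1
  | step {q p : Int} : pvReach N j A q → 1 ≤ q → q < p → p ≤ q + j → p ≤ N + 1 →
      A.getD (p - 2).toNat 0 ≠ 1 → pvReach N j A p

-- "the game can be cleared": some reachable cell jumps to ≥ N+2
def pvE (N j : Int) (A : List Int) : Prop := ∃ p, pvReach N j A p ∧ N + 2 ≤ p + j

lemma pvReach_bounds {N j : Int} {A : List Int} {p : Int} (hN : 0 ≤ N)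
    (h : pvReach N j A p) : 1 ≤ p ∧ p ≤ N + 1 := by
  induction h with
  | one => omega
  | step _ h1 h2 h3 h4 _ _ => omega

lemma pvReach_inv {N j : Int} {A : List Int} {p : Int} (hp : 2 ≤ p) :
    pvReach N j A p ↔ (p ≤ N + 1 ∧ A.getD (p - 2).toNat 0 ≠ 1 ∧
      ∃ q, 1 ≤ q ∧ q < p ∧ p ≤ q + j ∧ pvReach N j A q) := by
  constructor
  · intro h
    cases h with
    | one => omega
    | step hq h1 h2 h3 h4 h5 => exact ⟨h4, h5, _, h1, h2, h3, hq⟩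
  · rintro ⟨h4, h5, q, h1, h2, h3, hq⟩
    exact pvReach.step hq h1 h2 h3 h4 h5

-- the visited-set of A's BFS, as a predicate
def pvV (visited : List Int) (p : Int) : Prop := 1 ≤ p ∧ visited.getD p.toNat 0 = 1

def pvInv (N j : Int) (A visited queue : List Int) : Prop :=
  visited.length = (N + 3).toNat ∧
  (∀ x ∈ visited, x = 0 ∨ x = 1) ∧
  pvV visited 1 ∧
  (∀ p, pvV visited p → p ≤ N + 1 ∧ pvReach N j A p) ∧
  (∀ q ∈ queue, pvV visited q)

-- every fully processed cell: no winning jump, and all its legal moves already visited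
def pvClosed (N j : Int) (A visited queue : List Int) : Prop :=
  ∀ p, pvV visited p → p ∉ queue →
    p + j ≤ N + 1 ∧
    ∀ d, 1 ≤ d → d ≤ j → p + d ≤ N + 1 → A.getD (p + d - 2).toNat 0 ≠ 1 → pvV visited (p + d)

def pvMu (visited queue : List Int) : Nat := 2 * visited.count 0 + queue.length

lemma getD_set_eq_ite (l : List Int) (n m : Nat) (a : Int) :
    (l.set n a).getD m 0 = if m = n ∧ n < l.length then a else l.getD m 0 := by
  simp [List.getD, List.getElem?_set]
  split_ifs with h1 h2 h3 <;> simp_all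

lemma pvV_set {visited : List Int} {nxt p : Int} (h1 : 1 ≤ nxt)
    (hlen : nxt.toNat < visited.length) :
    pvV (visited.set nxt.toNat 1) p ↔ (pvV visited p ∨ p = nxt) := by
  unfold pvV
  rw [getD_set_eq_ite]
  by_cases hpn : p = nxt
  · subst hpn
    simp [hlen, h1]
  · have : p.toNat = nxt.toNat → ¬ 1 ≤ p := by omega
    constructor
    · rintro ⟨hp1, hv⟩
      rw [if_neg (by intro ⟨he, _⟩; exact this he hp1)] at hv
      exact Or.inl ⟨hp1, hv⟩
    · rintro (⟨hp1, hv⟩ | he)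
      · refine ⟨hp1, ?_⟩
        rw [if_neg (by intro ⟨he, _⟩; exact this he hp1)]
        exact hv
      · exact absurd he hpn

lemma count_zero_set {visited : List Int} {i : Nat} (hi : i < visited.length)
    (h0 : visited.getD i 0 = 0) :
    (visited.set i 1).count 0 + 1 = visited.count 0 := by
  induction visited generalizing i with
  | nil => simp at hi
  | cons a t ih =>
    cases i with
    | zero =>
      simp [List.getD] at h0
      subst h0
      simp
    | succ k =>
      have hk : k < t.length := by simpa using hi
      have h0' : t.getD k 0 = 0 := by simpa [List.getD] using h0
      simp only [List.set_cons_succ, List.count_cons]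
      have := ih hk h0'
      omega

lemma getD_zero_or_mem (l : List Int) (i : Nat) : l.getD i 0 = 0 ∨ l.getD i 0 ∈ l := by
  by_cases h : i < l.length
  · right
    rw [List.getD_eq_getElem l 0 h]
    exact List.getElem_mem h
  · left
    rw [List.getD_eq_default l 0 (by omega)]

lemma dice_lemma {N j : Int} {A : List Int} (hN : 0 ≤ N)
    {pos : Int} (hpos1 : 1 ≤ pos) (hR : pvReach N j A pos) :
    ∀ (ds : List Int) (visited queue : List Int), (∀ d ∈ ds, 1 ≤ d ∧ d ≤ j) →
    pvInv N j A visited queue →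
    (match bfsDice N A pos ds (visited, queue) with
     | none => ∃ d ∈ ds, N + 2 ≤ pos + d
     | some st =>
        pvInv N j A st.1 st.2 ∧
        pvMu st.1 st.2 ≤ pvMu visited queue ∧
        (∀ p, pvV visited p → pvV st.1 p) ∧
        (∀ p : Int, p ∉ st.2 → p ∉ queue) ∧
        (∀ p, pvV st.1 p → ¬ pvV visited p → p ∈ st.2) ∧
        (∀ d ∈ ds, pos + d ≤ N + 1 ∧
          (A.getD (pos + d - 2).toNat 0 ≠ 1 → pvV st.1 (pos + d)))) := by
  intro ds
  induction ds with
  | nil =>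
    intro visited queue _ hinv
    simp only [bfsDice]
    exact ⟨hinv, le_refl _, fun p hp => hp, fun p hp => hp,
      fun p hp hnp => absurd hp hnp, by simp⟩
  | cons d ds ih =>
    intro visited queue hds hinv
    have hd1 : 1 ≤ d := (hds d (by simp)).1
    have hdj : d ≤ j := (hds d (by simp)).2
    have hds' : ∀ e ∈ ds, 1 ≤ e ∧ e ≤ j := fun e he => hds e (by simp [he])
    simp only [bfsDice]
    by_cases hwin : N + 2 ≤ pos + d
    · rw [if_pos hwin]
      exact ⟨d, by simp, hwin⟩
    · rw [if_neg hwin]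
      have hle : pos + d ≤ N + 1 := by omega
      have hAidx : PySem.List.pyGetD A (pos + d - 2) 0 = A.getD (pos + d - 2).toNat 0 :=
        PySem.List.pyGetD_of_nonneg _ _ (by omega)
      by_cases hblock : PySem.List.pyGetD A (pos + d - 2) 0 = 1
      · rw [if_pos hblock]
        have res := ih visited queue hds' hinv
        cases hcall : bfsDice N A pos ds (visited, queue) with
        | none =>
          rw [hcall] at res
          obtain ⟨e, he, hew⟩ := res
          exact ⟨e, by simp [he], hew⟩
        | some st =>
          rw [hcall] at res
          obtain ⟨i1, i2, i3, i4, i5, i6⟩ := res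
          refine ⟨i1, i2, i3, i4, i5, ?_⟩
          intro e he
          rcases List.mem_cons.mp he with he | he
          · subst he
            exact ⟨hle, fun hc => absurd (hAidx ▸ hblock) hc⟩
          · exact i6 e he
      · rw [if_neg hblock]
        have hVidx : PySem.List.pyGetD visited (pos + d) 0 = visited.getD (pos + d).toNat 0 :=
          PySem.List.pyGetD_of_nonneg _ _ (by omega)
        by_cases hvis : PySem.List.pyGetD visited (pos + d) 0 ≠ 0
        · rw [if_pos hvis]
          have hvV : pvV visited (pos + d) := by
            refine ⟨by omega, ?_⟩
            rw [hVidx] at hvis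
            rcases getD_zero_or_mem visited (pos + d).toNat with h | h
            · exact absurd h hvis
            · rcases hinv.2.1 _ h with h0 | h1
              · exact absurd h0 hvis
              · exact h1
          have res := ih visited queue hds' hinv
          cases hcall : bfsDice N A pos ds (visited, queue) with
          | none =>
            rw [hcall] at res
            obtain ⟨e, he, hew⟩ := res
            exact ⟨e, by simp [he], hew⟩
          | some st =>
            rw [hcall] at res
            obtain ⟨i1, i2, i3, i4, i5, i6⟩ := res
            refine ⟨i1, i2, i3, i4, i5, ?_⟩
            intro e he
            rcases List.mem_cons.mp he with he | he
            · subst he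
              exact ⟨hle, fun _ => i3 _ hvV⟩
            · exact i6 e he
        · rw [if_neg hvis]
          rw [not_not] at hvis
          rw [hVidx] at hvis
          have hnn : (1:Int) ≤ pos + d := by omega
          have hlt : (pos + d).toNat < visited.length := by
            rw [hinv.1]; omega
          have hset : PySem.List.pySetD visited (pos + d) 1
              = visited.set (pos + d).toNat 1 :=
            PySem.List.pySetD_of_nonneg _ _ (by omega)
          rw [hset]
          have hAne : A.getD (pos + d - 2).toNat 0 ≠ 1 := hAidx ▸ hblock
          have hRn : pvReach N j A (pos + d) :=
            pvReach.step hR hpos1 (by omega) (by omega) hle hAne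
          have hVn : pvV (visited.set (pos + d).toNat 1) (pos + d) :=
            (pvV_set hnn hlt).mpr (Or.inr rfl)
          have hinv2 : pvInv N j A (visited.set (pos + d).toNat 1) (queue ++ [pos + d]) := by
            refine ⟨by rw [List.length_set]; exact hinv.1, ?_, ?_, ?_, ?_⟩
            · intro x hx
              rcases List.mem_or_eq_of_mem_set hx with hx | hx
              · exact hinv.2.1 x hx
              · right; exact hx
            · exact (pvV_set hnn hlt).mpr (Or.inl hinv.2.2.1)
            · intro p hp
              rcases (pvV_set hnn hlt).mp hp with hp | hp
              · exact hinv.2.2.2.1 p hp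
              · subst hp; exact ⟨hle, hRn⟩
            · intro q hq
              rcases List.mem_append.mp hq with hq | hq
              · exact (pvV_set hnn hlt).mpr (Or.inl (hinv.2.2.2.2 q hq))
              · rw [List.mem_singleton] at hq
                subst hq; exact hVn
          have hmu2 : pvMu (visited.set (pos + d).toNat 1) (queue ++ [pos + d])
              ≤ pvMu visited queue := by
            have := count_zero_set hlt hvis
            simp only [pvMu, List.length_append, List.length_singleton]
            omega
          have res := ih (visited.set (pos + d).toNat 1) (queue ++ [pos + d]) hds' hinv2
          cases hcall : bfsDice N A pos ds
              (visited.set (pos + d).toNat 1, queue ++ [pos + d]) with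
          | none =>
            rw [hcall] at res
            obtain ⟨e, he, hew⟩ := res
            exact ⟨e, by simp [he], hew⟩
          | some st =>
            rw [hcall] at res
            obtain ⟨i1, i2, i3, i4, i5, i6⟩ := res
            have hmono : ∀ p, pvV visited p → pvV st.1 p :=
              fun p hp => i3 p ((pvV_set hnn hlt).mpr (Or.inl hp))
            refine ⟨i1, le_trans i2 hmu2, hmono, ?_, ?_, ?_⟩
            · intro p hp
              have := i4 p hp
              intro hc
              exact this (List.mem_append.mpr (Or.inl hc))
            · intro p hp hnp
              by_cases hmid : pvV (visited.set (pos + d).toNat 1) p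
              · rcases (pvV_set hnn hlt).mp hmid with h | h
                · exact absurd h hnp
                · subst h
                  by_contra hc
                  exact (i4 _ hc) (List.mem_append.mpr (Or.inr (by simp)))
              · exact i5 p hp hmid
            · intro e he
              rcases List.mem_cons.mp he with he | he
              · subst he
                exact ⟨hle, fun _ => i3 _ hVn⟩
              · exact i6 e he

lemma pvComplete {N j : Int} {A visited : List Int}
    (hinv : pvInv N j A visited []) (hcl : pvClosed N j A visited []) :
    ∀ p, pvReach N j A p → pvV visited p := by
  intro p hp
  induction hp with
  | one => exact hinv.2.2.1
  | @step q p hq h1 h2 h3 h4 h5 ihq =>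
    have e := hcl q ihq (by simp)
    have h := e.2 (p - q) (by omega) (by omega) (by omega)
    rw [show q + (p - q) = p from by ring] at h
    exact h h5

lemma loop_lemma {N j : Int} {A : List Int} (hN : 0 ≤ N) (hj : 1 ≤ j) :
    ∀ (fuel : Nat) (visited queue : List Int), pvInv N j A visited queue →
    pvClosed N j A visited queue → pvMu visited queue < fuel →
    ((bfsLoop N j A fuel visited queue = 1 ↔ pvE N j A) ∧
     (bfsLoop N j A fuel visited queue = 0 ∨ bfsLoop N j A fuel visited queue = 1)) := by
  intro fuel
  induction fuel with
  | zero => intro v q _ _ hmu; omega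
  | succ f ih =>
    intro visited queue hinv hcl hmu
    cases queue with
    | nil =>
      simp only [bfsLoop]
      refine ⟨⟨fun h => absurd h (by norm_num), fun hE => ?_⟩, Or.inl (by trivial)⟩
      exfalso
      obtain ⟨p, hp, hw⟩ := hE
      have hv := pvComplete hinv hcl p hp
      have := (hcl p hv (by simp)).1
      omega
    | cons pos rest =>
      have hvpos : pvV visited pos := hinv.2.2.2.2 pos (by simp)
      obtain ⟨hpN, hpR⟩ := hinv.2.2.2.1 pos hvpos
      have hpos1 : 1 ≤ pos := hvpos.1
      simp only [bfsLoop]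
      rw [if_neg (by omega)]
      have hinv' : pvInv N j A visited rest :=
        ⟨hinv.1, hinv.2.1, hinv.2.2.1, hinv.2.2.2.1,
         fun q hq => hinv.2.2.2.2 q (by simp [hq])⟩
      have hmem : ∀ d ∈ PySem.List.pyRange 1 (j + 1) 1, 1 ≤ d ∧ d ≤ j := by
        intro d hd
        rw [PySem.List.mem_pyRange_one] at hd
        omega
      have res := dice_lemma hN hpos1 hpR
        (PySem.List.pyRange 1 (j + 1) 1) visited rest hmem hinv'
      cases hcall : bfsDice N A pos (PySem.List.pyRange 1 (j + 1) 1) (visited, rest) with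
      | none =>
        rw [hcall] at res
        obtain ⟨d, hd, hw⟩ := res
        have hdj := (hmem d hd).2
        exact ⟨⟨fun _ => ⟨pos, hpR, by omega⟩, fun _ => rfl⟩, Or.inr rfl⟩
      | some st =>
        rw [hcall] at res
        obtain ⟨i1, i2, i3, i4, i5, i6⟩ := res
        have hcl2 : pvClosed N j A st.1 st.2 := by
          intro p hpv hpq
          by_cases hpe : p = pos
          · subst hpe
            refine ⟨(i6 j (by rw [PySem.List.mem_pyRange_one]; omega)).1, ?_⟩
            intro d hd1 hd2 _ hA1
            exact (i6 d (by rw [PySem.List.mem_pyRange_one]; omega)).2 hA1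
          · have hold : pvV visited p := by
              by_contra hnv
              exact hpq (i5 p hpv hnv)
            have hq : p ∉ pos :: rest := by
              intro hc
              rcases List.mem_cons.mp hc with h | h
              · exact hpe h
              · exact (i4 p hpq) h
            obtain ⟨c1, c2⟩ := hcl p hold hq
            exact ⟨c1, fun d h1 h2 h3 h4 => i3 _ (c2 d h1 h2 h3 h4)⟩
        have hmu2 : pvMu st.1 st.2 < f := by
          have hc : pvMu visited (pos :: rest) = pvMu visited rest + 1 := by
            simp only [pvMu, List.length_cons]
            omega
          omega
        exact ih st.1 st.2 i1 hcl2 hmu2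

lemma a_char {N j : Int} {A : List Int} (hN : 0 ≤ N) (hj : 1 ≤ j) :
    (can_clear N A j = 1 ↔ pvE N j A) ∧ (can_clear N A j = 0 ∨ can_clear N A j = 1) := by
  unfold can_clear
  have hlen3 : 3 ≤ (N + 3).toNat := by omega
  have hset : PySem.List.pySetD (List.replicate (N + 3).toNat 0) 1 1
      = (List.replicate (N + 3).toNat (0:Int)).set 1 1 := by
    have := PySem.List.pySetD_of_nonneg (List.replicate (N + 3).toNat (0:Int)) 1
      (show (0:Int) ≤ 1 by omega)
    simpa using this
  rw [hset]
  set v0 := (List.replicate (N + 3).toNat (0:Int)).set 1 1 with hv0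
  have hrep : ∀ i : Nat, (List.replicate (N + 3).toNat (0:Int)).getD i 0 = 0 := by
    intro i
    rcases getD_zero_or_mem (List.replicate (N + 3).toNat (0:Int)) i with h | h
    · exact h
    · exact List.eq_of_mem_replicate h
  have hgd : ∀ i : Nat, v0.getD i 0 = if i = 1 then 1 else 0 := by
    intro i
    rw [hv0, getD_set_eq_ite]
    by_cases hi : i = 1
    · simp [hi, List.length_replicate]
      omega
    · simp [hi]
  have hinv : pvInv N j A v0 [1] := by
    refine ⟨?_, ?_, ?_, ?_, ?_⟩
    · rw [hv0, List.length_set, List.length_replicate]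
    · intro x hx
      rcases List.mem_or_eq_of_mem_set hx with hx | hx
      · left; exact List.eq_of_mem_replicate hx
      · right; exact hx
    · exact ⟨le_refl _, by rw [hgd]; norm_num⟩
    · intro p hp
      obtain ⟨hp1, hpv⟩ := hp
      rw [hgd] at hpv
      have hp1' : p = 1 := by
        by_contra hc
        have : p.toNat ≠ 1 := by omega
        rw [if_neg this] at hpv
        norm_num at hpv
      subst hp1'
      exact ⟨by omega, pvReach.one⟩
    · intro q hq
      rw [List.mem_singleton] at hq
      subst hq
      exact ⟨le_refl _, by rw [hgd]; norm_num⟩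
  have hcl : pvClosed N j A v0 [1] := by
    intro p hp hpq
    exfalso
    obtain ⟨hp1, hpv⟩ := hp
    rw [hgd] at hpv
    have : p = 1 := by
      by_contra hc
      have : p.toNat ≠ 1 := by omega
      rw [if_neg this] at hpv
      norm_num at hpv
    exact hpq (by simp [this])
  have hmu : pvMu v0 [1] < 2 * (N + 3).toNat + 1 := by
    have h0 : (List.replicate (N + 3).toNat (0:Int)).getD 1 0 = 0 := hrep 1
    have hc := count_zero_set (visited := List.replicate (N + 3).toNat (0:Int))
      (i := 1) (by rw [List.length_replicate]; omega) h0
    have hcr : (List.replicate (N + 3).toNat (0:Int)).count 0 = (N + 3).toNat :=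
      List.count_replicate_self
    simp only [pvMu, hv0, List.length_singleton]
    omega
  exact loop_lemma hN hj _ v0 [1] hinv hcl hmu

-- ===== B side =====
-- invariant of B's greedy pass: after processing positions up to P, `last` is the farthest
-- reachable position among 1..P
def pvGInv (N j : Int) (A : List Int) (P last : Int) : Prop :=
  pvReach N j A last ∧ 1 ≤ last ∧ last ≤ P ∧ (∀ p, pvReach N j A p → p ≤ P → p ≤ last)

lemma greedy_step_lemma {N j : Int} {A : List Int}
    {P last : Int} (hP : 1 ≤ P) (hPN : P + 1 ≤ N + 1)
    (h : pvGInv N j A P last) : pvGInv N j A (P + 1) (greedyStep A j last (P + 1)) := by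
  obtain ⟨hR, h1, h2, hmax⟩ := h
  have hgA : PySem.List.pyGetD A (P + 1 - 2) 0 = A.getD (P + 1 - 2).toNat 0 :=
    PySem.List.pyGetD_of_nonneg _ _ (by omega)
  unfold greedyStep
  by_cases hc : P + 1 - last ≤ j ∧ PySem.List.pyGetD A (P + 1 - 2) 0 ≠ 1
  · rw [if_pos hc]
    refine ⟨pvReach.step hR h1 (by omega) (by omega) hPN (hgA ▸ hc.2), by omega, le_refl _, ?_⟩
    intro p _ hp
    exact hp
  · rw [if_neg hc]
    refine ⟨hR, h1, by omega, ?_⟩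
    intro p hpR hp
    rcases Int.lt_or_le p (P + 1) with hlt | hge
    · exact hmax p hpR (by omega)
    · exfalso
      have hpe : p = P + 1 := by omega
      subst hpe
      obtain ⟨-, hA, q, hq1, hq2, hq3, hqR⟩ :=
        (pvReach_inv (show (2:Int) ≤ P + 1 by omega)).mp hpR
      have hql : q ≤ last := hmax q hqR (by omega)
      exact hc ⟨by omega, by rw [hgA]; exact hA⟩

lemma greedy_loop_lemma {N j : Int} {A : List Int} (hN : 0 ≤ N) :
    ∀ k : Nat, 1 + (k : Int) ≤ N + 1 →
      pvGInv N j A (1 + (k : Int))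
        ((PySem.List.pyRange 2 (2 + (k : Int)) 1).foldl (greedyStep A j) 1) := by
  intro k
  induction k with
  | zero =>
    intro _
    rw [show ((0:Nat):Int) = 0 from rfl,
      show (2:Int) + 0 = 2 from by ring, PySem.List.pyRange_one_eq_nil (le_refl 2),
      List.foldl_nil, show (1:Int) + 0 = 1 from by ring]
    refine ⟨pvReach.one, le_refl _, le_refl _, ?_⟩
    intro p hp hle
    have := pvReach_bounds hN hp
    omega
  | succ k ih =>
    intro hk
    have hcast : ((k + 1 : Nat) : Int) = (k : Int) + 1 := by push_cast; ring
    rw [hcast]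
    have hk' : 1 + (k : Int) ≤ N + 1 := by omega
    rw [show (2:Int) + ((k:Int) + 1) = (2 + (k:Int)) + 1 from by ring,
      PySem.List.pyRange_one_succ_right (by omega), List.foldl_append, List.foldl_cons,
      List.foldl_nil]
    have hstep := greedy_step_lemma (P := 1 + (k:Int)) (by omega) (by omega) (ih hk')
    rw [show (1:Int) + (k:Int) + 1 = 2 + (k:Int) from by ring] at hstep
    rw [show (1:Int) + ((k:Int) + 1) = 2 + (k:Int) from by ring]
    exact hstep

lemma b_char {N j : Int} {A : List Int} (hN : 0 ≤ N) :
    (can_clear_alt N A j = 1 ↔ pvE N j A) ∧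
    (can_clear_alt N A j = 0 ∨ can_clear_alt N A j = 1) := by
  unfold can_clear_alt
  have hinv := greedy_loop_lemma (A := A) (j := j) hN N.toNat (by omega)
  rw [show (1:Int) + (N.toNat : Int) = N + 1 from by omega,
    show (2:Int) + (N.toNat : Int) = N + 2 from by omega] at hinv
  set last := (PySem.List.pyRange 2 (N + 2) 1).foldl (greedyStep A j) 1 with hlast
  obtain ⟨hR, h1, h2, hmax⟩ := hinv
  have hiff : N + 2 ≤ last + j ↔ pvE N j A := by
    constructor
    · intro hw
      exact ⟨last, hR, hw⟩
    · rintro ⟨p, hpR, hw⟩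
      have hb := pvReach_bounds hN hpR
      have := hmax p hpR (by omega)
      omega
  by_cases hc : N + 2 ≤ last + j
  · rw [if_pos hc]
    exact ⟨⟨fun _ => hiff.mp hc, fun _ => rfl⟩, Or.inr rfl⟩
  · rw [if_neg hc]
    refine ⟨⟨fun h => absurd h (by norm_num), fun hE => absurd (hiff.mpr hE) hc⟩, Or.inl rfl⟩

-- degenerate cases of A
lemma bfsLoop_nil {N j : Int} {A visited : List Int} {f : Nat} (hf : 1 ≤ f) :
    bfsLoop N j A f visited [] = 0 := by
  cases f with
  | zero => omega
  | succ k => rfl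

lemma case_neg_one {A : List Int} {j : Int} : can_clear (-1) A j = 1 := by
  rfl

lemma case_j_nonpos {N j : Int} {A : List Int} (hN : 0 ≤ N) (hj : j ≤ 0) :
    can_clear N A j = 0 := by
  unfold can_clear
  rw [show 2 * (N + 3).toNat + 1 = (2 * (N + 3).toNat) + 1 from rfl]
  simp only [bfsLoop]
  rw [if_neg (by omega), PySem.List.pyRange_one_eq_nil (by omega)]
  simp only [bfsDice]
  exact bfsLoop_nil (by omega)

lemma b_neg_one {A : List Int} {j : Int} (hj : 0 ≤ j) : can_clear_alt (-1) A j = 1 := by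
  unfold can_clear_alt
  rw [show (-1:Int) + 2 = 1 from by ring,
    PySem.List.pyRange_one_eq_nil (by omega : (1:Int) ≤ 2), List.foldl_nil]
  rw [if_pos (by omega)]

-- ===== VERDICT (by name: the statement is the Claim_ definition above) =====
theorem can_clear_spec : Claim_equal_can_clear := by
  intro N A j _ hpre
  unfold Spec_can_clear
  obtain ⟨hN1, hNj, -⟩ := hpre
  rcases Int.lt_or_le N 0 with hneg | hN0
  · have hNe : N = -1 := by omega
    subst hNe
    rw [case_neg_one, b_neg_one (by omega)]
  · by_cases hj0 : j ≤ 0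
    · rw [case_j_nonpos hN0 hj0]
      obtain ⟨hb1, hb01⟩ := b_char (A := A) (j := j) hN0
      have hnE : ¬ pvE N j A := by
        rintro ⟨p, hpR, hw⟩
        have := pvReach_bounds hN0 hpR
        omega
      rcases hb01 with h | h
      · rw [h]
      · exact absurd (hb1.mp h) hnE
    · have hj1 : 0 < j := by omega
      obtain ⟨ha1, ha01⟩ := a_char (A := A) (j := j) hN0 (by omega)
      obtain ⟨hb1, hb01⟩ := b_char (A := A) (j := j) hN0
      by_cases hE : pvE N j A
      · rw [ha1.mpr hE, hb1.mpr hE]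
      · rcases ha01 with h | h
        · rcases hb01 with h' | h'
          · rw [h, h']
          · exact absurd (hb1.mp h') hE
        · exact absurd (ha1.mp h) hE
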